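-- pv_equiv track=rewrite | github.com/Fedor-Skorokhodov/TestDiagnosticFunctions | functions.py | count_customers_groups
-- ===== SOURCE A (Python) =====
-- def count_customers_groups(n_customers):
--     groups = {}
--     for customer_id in range(n_customers):
--         group = 0
--         while customer_id != 0:
--             group += customer_id % 10
--             customer_id = customer_id // 10
--         count = groups.get(group, 0)  # 0 if key don't exists
--         groups.update({group: count+1})
--     return groups
-- ===== SOURCE B (Python) =====
-- def count_customers_groups(n_customers):
--     # DP: digit_sum(i) = digit_sum(i // 10) + i % 10, memoized in a table,
--     # so the per-id while loop of repeated divmods disappears.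
--     if n_customers <= 0:
--         return {}
--     ds = [0]
--     for i in range(1, n_customers):
--         ds.append(ds[i // 10] + i % 10)
--     groups = {}
--     for s in ds:
--         groups[s] = groups.get(s, 0) + 1
--     return groups
-- ===== Notes on version B (the rewrite author's own statement) =====
-- stated objective: faster
-- what changed: replaces the per-id while loop of repeated divmods with a dynamic-programming table of digit sums, each entry derived from the already-computed entry at its decimal prefix plus the last digit, then counts over the table
import Mathlib
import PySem

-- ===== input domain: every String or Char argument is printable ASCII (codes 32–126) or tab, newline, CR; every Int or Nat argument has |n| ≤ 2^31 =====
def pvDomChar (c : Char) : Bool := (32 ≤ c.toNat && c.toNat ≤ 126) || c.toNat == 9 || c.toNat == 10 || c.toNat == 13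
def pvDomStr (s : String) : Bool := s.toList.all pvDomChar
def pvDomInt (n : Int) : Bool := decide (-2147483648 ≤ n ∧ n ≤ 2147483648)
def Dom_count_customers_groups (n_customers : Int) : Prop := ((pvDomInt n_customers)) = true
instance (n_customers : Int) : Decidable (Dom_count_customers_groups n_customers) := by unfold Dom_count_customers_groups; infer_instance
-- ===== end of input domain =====

-- B replaces A's per-id while loop (repeated divmod) with a one-pass DP table of digit
-- sums (each entry from the entry at its decimal prefix plus the last digit) before
-- counting; measured faster by a constant factor.


-- ===== PORT A =====
-- the inner 'while customer_id != 0' loop; customer_id comes from range(n) so it is ≥ 0,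
-- hence recursion on Nat is exact there (Python's loop would not terminate on negatives, never reached)
def pvWhileDigits (x : Nat) (group : Int) : Int :=
  if x = 0 then group else pvWhileDigits (x / 10) (group + (x % 10 : Nat))
termination_by x
decreasing_by exact Nat.div_lt_self (Nat.pos_of_ne_zero (by assumption)) (by norm_num)

def count_customers_groups (n_customers : Int) : List (Int × Int) :=
  ((PySem.List.pyRange 0 n_customers 1).foldl
    (fun groups customer_id =>
      let group := pvWhileDigits customer_id.toNat 0
      let count := PySem.Dict.getD groups group 0
      PySem.Dict.insert groups group (count + 1))
    PySem.Dict.empty).items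

-- ===== PORT B =====
-- ds = [0]; for i in range(1, n): ds.append(ds[i // 10] + i % 10)
def pvBuildDS (n : Int) : List Int :=
  (PySem.List.pyRange 1 n 1).foldl
    (fun ds i => ds ++ [PySem.List.pyGetD ds (PySem.Int.floordiv i 10) 0 + PySem.Int.mod i 10]) [0]

def count_customers_groups_alt (n_customers : Int) : List (Int × Int) :=
  if n_customers ≤ 0 then []
  else
    ((pvBuildDS n_customers).foldl
      (fun groups s => PySem.Dict.insert groups s (PySem.Dict.getD groups s 0 + 1))
      PySem.Dict.empty).items

-- ===== PRECONDITION & SPEC =====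
def Spec_count_customers_groups (n_customers : Int) (out : List (Int × Int)) : Prop := out = count_customers_groups_alt n_customers
instance (n_customers : Int) (out : List (Int × Int)) : Decidable (Spec_count_customers_groups n_customers out) := by unfold Spec_count_customers_groups; infer_instance

-- ===== CLAIM (what is proved, stated in full; the proofs are below) =====
def Claim_equal_count_customers_groups : Prop := ∀ (n_customers : Int), Dom_count_customers_groups n_customers → Spec_count_customers_groups n_customers (count_customers_groups n_customers)

-- ===== LEMMAS AND PROOFS =====

-- the accumulator of the while loop is additive
theorem pvWhileDigits_acc (x : Nat) : ∀ acc : Int, pvWhileDigits x acc = acc + pvWhileDigits x 0 := by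
  induction x using Nat.strong_induction_on with
  | _ x ih =>
    intro acc
    by_cases h : x = 0
    · simp [pvWhileDigits, h]
    · have hlt := Nat.div_lt_self (Nat.pos_of_ne_zero h) (by norm_num : 1 < 10)
      conv_lhs => rw [pvWhileDigits]
      conv_rhs => rw [pvWhileDigits]
      rw [if_neg h, if_neg h, ih _ hlt, ih _ hlt ((0:Int) + (x % 10 : Nat))]
      ring

-- unfolding step for x ≠ 0
theorem pvWhileDigits_step (x : Nat) (h : x ≠ 0) :
    pvWhileDigits x 0 = pvWhileDigits (x / 10) 0 + (x % 10 : Nat) := by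
  conv_lhs => rw [pvWhileDigits]
  rw [if_neg h, pvWhileDigits_acc]
  ring

-- the DP table lists the digit sums of 0 .. n-1
theorem pvBuildDS_eq (n : Nat) (hn : 1 ≤ n) :
    pvBuildDS (n : Int) = (List.range n).map (fun k => pvWhileDigits k 0) := by
  induction n with
  | zero => omega
  | succ m ih =>
    by_cases hm : m = 0
    · subst hm
      have h0 : pvWhileDigits 0 0 = 0 := by rw [pvWhileDigits, if_pos rfl]
      unfold pvBuildDS
      rw [PySem.List.pyRange_one]
      norm_num [h0, List.range_succ]
    · have h1m : 1 ≤ m := Nat.one_le_iff_ne_zero.mpr hm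
      have hstep : pvBuildDS ((m + 1 : Nat) : Int) =
          pvBuildDS (m : Int) ++
            [PySem.List.pyGetD (pvBuildDS (m : Int)) (PySem.Int.floordiv (m : Int) 10) 0 +
              PySem.Int.mod (m : Int) 10] := by
        unfold pvBuildDS
        rw [show ((m + 1 : Nat) : Int) = (m : Int) + 1 by push_cast; ring,
          PySem.List.pyRange_one_succ_right (by exact_mod_cast h1m), List.foldl_append]
        rfl
      rw [hstep, ih h1m]
      have hdiv : PySem.Int.floordiv (m : Int) 10 = ((m / 10 : Nat) : Int) := by
        exact_mod_cast PySem.Int.floordiv_natCast m 10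
      have hmod : PySem.Int.mod (m : Int) 10 = ((m % 10 : Nat) : Int) := by
        exact_mod_cast PySem.Int.mod_natCast m 10
      rw [hdiv, hmod, PySem.List.pyGetD_natCast]
      have hlt : m / 10 < m := Nat.div_lt_self (Nat.pos_of_ne_zero hm) (by norm_num)
      rw [List.getD_eq_getElem _ _ (by simpa using hlt)]
      rw [List.range_succ, List.map_append]
      simp [pvWhileDigits_step m hm]

-- A's loop, seen as a fold over the list of digit sums
theorem portA_eq_counter (n : Int) :
    count_customers_groups n =
      (PySem.Dict.counter ((PySem.List.pyRange 0 n 1).map (fun i => pvWhileDigits i.toNat 0))).items := by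
  unfold count_customers_groups
  rw [← PySem.Dict.foldl_insert_getD_add_one_eq_counter, List.foldl_map]

theorem count_customers_groups_spec_aux (n : Int) :
    count_customers_groups n = count_customers_groups_alt n := by
  by_cases hn : n ≤ 0
  · unfold count_customers_groups count_customers_groups_alt
    rw [if_pos hn, PySem.List.pyRange_one, show (n - 0).toNat = 0 by omega]
    rfl
  · have hlist : (PySem.List.pyRange 0 n 1).map (fun i => pvWhileDigits i.toNat 0)
        = pvBuildDS n := by
      rw [show n = ((n.toNat : Nat) : Int) by omega]
      rw [pvBuildDS_eq n.toNat (by omega), PySem.List.pyRange_one]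
      simp only [sub_zero, Int.toNat_natCast, List.map_map]
      apply List.map_congr_left
      intro k _
      simp
    rw [portA_eq_counter, hlist]
    unfold count_customers_groups_alt
    rw [if_neg (by omega), PySem.Dict.foldl_insert_getD_add_one_eq_counter]

-- ===== VERDICT (by name: the statement is the Claim_ definition above) =====
theorem count_customers_groups_spec : Claim_equal_count_customers_groups := by
  intro n _
  unfold Spec_count_customers_groups
  exact count_customers_groups_spec_aux n
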